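-- pv_equiv track=rewrite | github.com/vivadh4207/tradebot | src/dashboard/app.py | _humanize_event
-- ===== SOURCE A (Python) =====
-- from typing import Any, Dict, List, Optional
--
-- def _humanize_event(event: str, level: str, kv: Dict[str, str]
--                     ) -> tuple:
--     """Convert a structured log event into a human-readable one-liner
--     + emoji icon + kind tag (fills / exits / signals / warnings)."""
--     e = event.lower()
--     sym = kv.get("symbol") or kv.get("sym") or ""
--     price = kv.get("price") or ""
--
--     # Entries / fills
--     if e == "fill":
--         right = (kv.get("right") or "").upper()
--         strike = kv.get("strike", "?")
--         dte = kv.get("dte", "")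
--         dte_txt = f" · {dte}d" if dte else ""
--         return ("🟢", "fills",
--                 f"ENTRY · {sym} {right} ${strike}{dte_txt} @ ${price} "
--                 f"qty={kv.get('qty', '?')}")
--     if e == "fast_exit":
--         reason = (kv.get("reason") or "").strip("'\"")
--         reason_head = reason.split(":")[0] if reason else "exit"
--         pnl = kv.get("pnl_pct", "")
--         usd = kv.get("realized_usd", "")
--         usd_txt = f" ${usd}" if usd else ""
--         pnl_txt = f" ({pnl}%)" if pnl else ""
--         return ("🔴", "exits",
--                 f"EXIT · {sym} {reason_head}{pnl_txt}{usd_txt}")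
--     if e == "eod_force_close" or (e == "fast_exit" and "eod" in (kv.get("reason") or "")):
--         return ("🌇", "exits", f"EOD close · {sym}")
--
--     # Signals
--     if e == "ensemble_emit":
--         direction = kv.get("direction", "?")
--         score = kv.get("score", "?")
--         regime = kv.get("regime", "")
--         icon = "🔼" if direction == "bullish" else "🔽" if direction == "bearish" else "•"
--         return (icon, "signals",
--                 f"Signal · {sym} {direction} score {score}"
--                 + (f" [{regime}]" if regime else ""))
--     if e == "ensemble_skip":
--         reason = (kv.get("reason") or "").strip("'\"").split(":")[0]
--         return ("⏭", "signals", f"Skip · {sym} {reason}")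
--     if e == "exec_chain_block":
--         filt = kv.get("filter", "")
--         reason = (kv.get("reason") or "").strip("'\"")
--         return ("🛑", "signals",
--                 f"Block · {sym} {filt} — {reason[:80]}")
--     if e == "exec_chain_pass":
--         src = kv.get("signal") or kv.get("src") or ""
--         return ("✅", "signals", f"Pass · {sym} [{src}]")
--
--     # State
--     if e == "market_state_snapshot":
--         return ("📊", "state",
--                 f"State · regime={kv.get('regime', '?')} "
--                 f"vix={kv.get('vix', '?')} "
--                 f"breadth={kv.get('breadth_score', '?')}")
--     if e == "data_adapter":
--         return ("🔌", "state", f"Data adapter: {kv.get('kind', '?')}")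
--     if e == "strategy_mode":
--         return ("🎯", "state", f"Mode: {kv.get('mode', '?')}")
--
--     # Warnings / errors
--     if level in ("warning", "warn", "error"):
--         # Generic fallback with event + top kv
--         top = " · ".join(f"{k}={v[:30]}" for k, v in list(kv.items())[:3])
--         return ("⚠️" if level.startswith("warn") else "🛑",
--                 "warnings" if level.startswith("warn") else "errors",
--                 f"{event} · {top}")
--
--     # Default passthrough
--     top = " · ".join(f"{k}={v[:30]}" for k, v in list(kv.items())[:3])
--     return ("·", "other", f"{event}" + (f" · {top}" if top else ""))
-- ===== SOURCE B (Python) =====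
-- # B: declarative spec-table interpreter — each event is described by DATA (icon
-- # spec, tag, list of template pieces), and one generic renderer interprets the
-- # pieces; only the two generic fallbacks remain as code.
--
-- _DIR = ("dir",)  # icon computed from the 'direction' field
--
-- def _eval(kind, args, kv):
--     if kind == "sym":
--         return kv.get("symbol") or kv.get("sym") or ""
--     if kind == "price":
--         return kv.get("price") or ""
--     if kind == "getD":
--         return kv.get(args[0], args[1])
--     if kind == "upper":
--         return (kv.get(args[0]) or "").upper()
--     if kind == "rhead":
--         r = (kv.get("reason") or "").strip("'\"")
--         return r.split(":")[0] if r else "exit"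
--     if kind == "shead":
--         return (kv.get("reason") or "").strip("'\"").split(":")[0]
--     if kind == "strip80":
--         return (kv.get("reason") or "").strip("'\"")[:80]
--     # kind == "or2"
--     return kv.get(args[0]) or kv.get(args[1]) or ""
--
-- def _render(pieces, kv):
--     parts = []
--     for p in pieces:
--         if p[0] == "lit":
--             parts.append(p[1])
--         elif p[0] == "f":
--             parts.append(_eval(p[1], p[2], kv))
--         else:  # conditional wrap: pre + value + suf, only if value is nonempty
--             v = _eval(p[1], p[2], kv)
--             parts.append(p[3] + v + p[4] if v else "")
--     return "".join(parts)
--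
-- def _L(s): return ("lit", s)
-- def _F(kind, *args): return ("f", kind, args)
-- def _C(kind, pre, suf, *args): return ("c", kind, args, pre, suf)
--
-- _SPEC = {
--     "fill": ("🟢", "fills",
--              [_L("ENTRY · "), _F("sym"), _L(" "), _F("upper", "right"),
--               _L(" $"), _F("getD", "strike", "?"),
--               _C("getD", " · ", "d", "dte", ""),
--               _L(" @ $"), _F("price"), _L(" qty="), _F("getD", "qty", "?")]),
--     "fast_exit": ("🔴", "exits",
--                   [_L("EXIT · "), _F("sym"), _L(" "), _F("rhead"),
--                    _C("getD", " (", "%)", "pnl_pct", ""),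
--                    _C("getD", " $", "", "realized_usd", "")]),
--     "eod_force_close": ("🌇", "exits", [_L("EOD close · "), _F("sym")]),
--     "ensemble_emit": (_DIR, "signals",
--                       [_L("Signal · "), _F("sym"), _L(" "),
--                        _F("getD", "direction", "?"), _L(" score "),
--                        _F("getD", "score", "?"),
--                        _C("getD", " [", "]", "regime", "")]),
--     "ensemble_skip": ("⏭", "signals",
--                       [_L("Skip · "), _F("sym"), _L(" "), _F("shead")]),
--     "exec_chain_block": ("🛑", "signals",
--                          [_L("Block · "), _F("sym"), _L(" "),
--                           _F("getD", "filter", ""), _L(" — "), _F("strip80")]),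
--     "exec_chain_pass": ("✅", "signals",
--                         [_L("Pass · "), _F("sym"), _L(" ["),
--                          _F("or2", "signal", "src"), _L("]")]),
--     "market_state_snapshot": ("📊", "state",
--                               [_L("State · regime="), _F("getD", "regime", "?"),
--                                _L(" vix="), _F("getD", "vix", "?"),
--                                _L(" breadth="), _F("getD", "breadth_score", "?")]),
--     "data_adapter": ("🔌", "state",
--                      [_L("Data adapter: "), _F("getD", "kind", "?")]),
--     "strategy_mode": ("🎯", "state", [_L("Mode: "), _F("getD", "mode", "?")]),
-- }
--
-- def _humanize_event(event: str, level: str, kv) -> tuple: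
--     spec = _SPEC.get(event.lower())
--     if spec is not None:
--         icon, tag, pieces = spec
--         if icon is _DIR:
--             d = kv.get("direction", "?")
--             icon = "🔼" if d == "bullish" else "🔽" if d == "bearish" else "•"
--         return (icon, tag, _render(pieces, kv))
--     top = " · ".join(f"{k}={v[:30]}" for k, v in list(kv.items())[:3])
--     if level in ("warning", "warn", "error"):
--         warn = level.startswith("warn")
--         return ("⚠️" if warn else "🛑",
--                 "warnings" if warn else "errors",
--                 f"{event} · {top}")
--     return ("·", "other", event + (f" · {top}" if top else ""))
-- ===== Notes on version B (the rewrite author's own statement) =====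
-- stated objective: alternative
-- what changed: Replaced A's if/elif chain of hard-coded f-string branch bodies by a declarative spec table (per event: icon spec, tag, list of template pieces) interpreted by one generic renderer/evaluator, with the two generic fallbacks as the only remaining code paths; the dead 'fast_exit and eod' disjunct collapses into the plain 'eod_force_close' key.
import Mathlib
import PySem

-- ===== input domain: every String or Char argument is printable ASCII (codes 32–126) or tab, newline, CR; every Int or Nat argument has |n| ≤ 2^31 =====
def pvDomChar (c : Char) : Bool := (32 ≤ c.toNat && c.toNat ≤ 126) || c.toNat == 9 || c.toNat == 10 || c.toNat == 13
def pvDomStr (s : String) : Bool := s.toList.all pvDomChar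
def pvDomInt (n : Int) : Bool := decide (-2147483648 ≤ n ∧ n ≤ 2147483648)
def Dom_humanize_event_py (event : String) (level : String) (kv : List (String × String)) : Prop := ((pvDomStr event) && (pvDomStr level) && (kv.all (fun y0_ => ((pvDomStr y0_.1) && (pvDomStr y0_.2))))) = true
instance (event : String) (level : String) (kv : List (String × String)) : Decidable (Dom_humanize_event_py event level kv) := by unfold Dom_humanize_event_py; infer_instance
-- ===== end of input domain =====

-- B replaces A's hard-coded if/elif branch bodies by a declarative spec table
-- (icon, tag, template pieces per event) interpreted by one generic renderer
-- (alternative decomposition; same cost).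

-- shared ports of Python dict/str idioms both sources use
-- kv.get(k)  (dict lookup = first match in the association list)
def pvGet? (kv : List (String × String)) (k : String) : Option String :=
  (kv.find? (fun p => p.1 == k)).map (·.2)
-- kv.get(k, d)
def pvGetD (kv : List (String × String)) (k d : String) : String :=
  (pvGet? kv k).getD d
-- `o or d` for o an Optional[str] ('' and None are falsy)
def pvOrS (o : Option String) (d : String) : String :=
  match o with
  | some s => if s == "" then d else s
  | none => d
-- " · ".join(f"{k}={v[:30]}" for k, v in list(kv.items())[:3])
def pvTop (kv : List (String × String)) : String :=
  PySem.Str.join " · "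
    ((kv.take 3).map (fun p => p.1 ++ "=" ++ PySem.Str.slice p.2 none (some 30)))

-- ===== PORT A =====
def humanize_event_py (event : String) (level : String) (kv : List (String × String)) : String × String × String :=
  let e := PySem.Str.lower event
  let sym := pvOrS (pvGet? kv "symbol") (pvOrS (pvGet? kv "sym") "")
  let price := pvOrS (pvGet? kv "price") ""
  if e == "fill" then
    let right := PySem.Str.upper (pvOrS (pvGet? kv "right") "")
    let strike := pvGetD kv "strike" "?"
    let dte := pvGetD kv "dte" ""
    let dte_txt := if dte == "" then "" else " · " ++ dte ++ "d"
    ("🟢", "fills",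
     "ENTRY · " ++ sym ++ " " ++ right ++ " $" ++ strike ++ dte_txt ++ " @ $" ++ price
       ++ " qty=" ++ pvGetD kv "qty" "?")
  else if e == "fast_exit" then
    let reason := PySem.Str.stripChars (pvOrS (pvGet? kv "reason") "") "'\""
    let reason_head := if reason == "" then "exit" else ((PySem.Str.split? reason ":").getD []).headD ""
    let pnl := pvGetD kv "pnl_pct" ""
    let usd := pvGetD kv "realized_usd" ""
    let usd_txt := if usd == "" then "" else " $" ++ usd
    let pnl_txt := if pnl == "" then "" else " (" ++ pnl ++ "%)"
    ("🔴", "exits", "EXIT · " ++ sym ++ " " ++ reason_head ++ pnl_txt ++ usd_txt)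
  else if e == "eod_force_close" || (e == "fast_exit" && PySem.Str.isIn "eod" (pvOrS (pvGet? kv "reason") "")) then
    ("🌇", "exits", "EOD close · " ++ sym)
  else if e == "ensemble_emit" then
    let direction := pvGetD kv "direction" "?"
    let score := pvGetD kv "score" "?"
    let regime := pvGetD kv "regime" ""
    let icon := if direction == "bullish" then "🔼" else if direction == "bearish" then "🔽" else "•"
    (icon, "signals",
     "Signal · " ++ sym ++ " " ++ direction ++ " score " ++ score
       ++ (if regime == "" then "" else " [" ++ regime ++ "]"))
  else if e == "ensemble_skip" then
    let reason := ((PySem.Str.split? (PySem.Str.stripChars (pvOrS (pvGet? kv "reason") "") "'\"") ":").getD []).headD ""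
    ("⏭", "signals", "Skip · " ++ sym ++ " " ++ reason)
  else if e == "exec_chain_block" then
    let filt := pvGetD kv "filter" ""
    let reason := PySem.Str.stripChars (pvOrS (pvGet? kv "reason") "") "'\""
    ("🛑", "signals", "Block · " ++ sym ++ " " ++ filt ++ " — " ++ PySem.Str.slice reason none (some 80))
  else if e == "exec_chain_pass" then
    let src := pvOrS (pvGet? kv "signal") (pvOrS (pvGet? kv "src") "")
    ("✅", "signals", "Pass · " ++ sym ++ " [" ++ src ++ "]")
  else if e == "market_state_snapshot" then
    ("📊", "state",
     "State · regime=" ++ pvGetD kv "regime" "?" ++ " vix=" ++ pvGetD kv "vix" "?"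
       ++ " breadth=" ++ pvGetD kv "breadth_score" "?")
  else if e == "data_adapter" then
    ("🔌", "state", "Data adapter: " ++ pvGetD kv "kind" "?")
  else if e == "strategy_mode" then
    ("🎯", "state", "Mode: " ++ pvGetD kv "mode" "?")
  else if level == "warning" || level == "warn" || level == "error" then
    let top := pvTop kv
    ((if PySem.Str.startswith level "warn" then "⚠️" else "🛑"),
     (if PySem.Str.startswith level "warn" then "warnings" else "errors"),
     event ++ " · " ++ top)
  else
    let top := pvTop kv
    ("·", "other", event ++ (if top == "" then "" else " · " ++ top))

-- ===== PORT B =====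
-- field kinds of the template language (the `kind` strings of Source B's _eval)
inductive PvKind : Type
  | sym | price
  | getD (k d : String)
  | upper (k : String)
  | rhead | shead | strip80
  | or2 (k1 k2 : String)
deriving DecidableEq, Repr

-- template pieces: literal text, a field, or a conditionally wrapped field
inductive PvPiece : Type
  | lit (s : String)
  | fld (k : PvKind)
  | cond (k : PvKind) (pre suf : String)
deriving DecidableEq, Repr

-- icon spec: fixed emoji, or computed from the 'direction' field
inductive PvIcon : Type
  | fixed (s : String)
  | byDir
deriving DecidableEq, Repr

-- Source B _eval
def pvEval (k : PvKind) (kv : List (String × String)) : String :=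
  match k with
  | .sym => pvOrS (pvGet? kv "symbol") (pvOrS (pvGet? kv "sym") "")
  | .price => pvOrS (pvGet? kv "price") ""
  | .getD k d => pvGetD kv k d
  | .upper k => PySem.Str.upper (pvOrS (pvGet? kv k) "")
  | .rhead =>
      let r := PySem.Str.stripChars (pvOrS (pvGet? kv "reason") "") "'\""
      if r == "" then "exit" else ((PySem.Str.split? r ":").getD []).headD ""
  | .shead => ((PySem.Str.split? (PySem.Str.stripChars (pvOrS (pvGet? kv "reason") "") "'\"") ":").getD []).headD ""
  | .strip80 => PySem.Str.slice (PySem.Str.stripChars (pvOrS (pvGet? kv "reason") "") "'\"") none (some 80)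
  | .or2 k1 k2 => pvOrS (pvGet? kv k1) (pvOrS (pvGet? kv k2) "")

-- one rendered part (the loop body of Source B's _render)
def pvEmit (kv : List (String × String)) (p : PvPiece) : String :=
  match p with
  | .lit s => s
  | .fld k => pvEval k kv
  | .cond k pre suf =>
      let v := pvEval k kv
      if v == "" then "" else pre ++ v ++ suf

-- Source B _render ("".join of the parts)
def pvRender (pieces : List PvPiece) (kv : List (String × String)) : String :=
  String.join (pieces.map (pvEmit kv))

-- Source B _SPEC: the whole per-event behaviour as data
def pvSpec : List (String × PvIcon × String × List PvPiece) :=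
  [("fill", .fixed "🟢", "fills",
      [.lit "ENTRY · ", .fld .sym, .lit " ", .fld (.upper "right"),
       .lit " $", .fld (.getD "strike" "?"),
       .cond (.getD "dte" "") " · " "d",
       .lit " @ $", .fld .price, .lit " qty=", .fld (.getD "qty" "?")]),
   ("fast_exit", .fixed "🔴", "exits",
      [.lit "EXIT · ", .fld .sym, .lit " ", .fld .rhead,
       .cond (.getD "pnl_pct" "") " (" "%)",
       .cond (.getD "realized_usd" "") " $" ""]),
   ("eod_force_close", .fixed "🌇", "exits", [.lit "EOD close · ", .fld .sym]),
   ("ensemble_emit", .byDir, "signals",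
      [.lit "Signal · ", .fld .sym, .lit " ", .fld (.getD "direction" "?"),
       .lit " score ", .fld (.getD "score" "?"),
       .cond (.getD "regime" "") " [" "]"]),
   ("ensemble_skip", .fixed "⏭", "signals",
      [.lit "Skip · ", .fld .sym, .lit " ", .fld .shead]),
   ("exec_chain_block", .fixed "🛑", "signals",
      [.lit "Block · ", .fld .sym, .lit " ", .fld (.getD "filter" ""),
       .lit " — ", .fld .strip80]),
   ("exec_chain_pass", .fixed "✅", "signals",
      [.lit "Pass · ", .fld .sym, .lit " [", .fld (.or2 "signal" "src"), .lit "]"]),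
   ("market_state_snapshot", .fixed "📊", "state",
      [.lit "State · regime=", .fld (.getD "regime" "?"),
       .lit " vix=", .fld (.getD "vix" "?"),
       .lit " breadth=", .fld (.getD "breadth_score" "?")]),
   ("data_adapter", .fixed "🔌", "state",
      [.lit "Data adapter: ", .fld (.getD "kind" "?")]),
   ("strategy_mode", .fixed "🎯", "state", [.lit "Mode: ", .fld (.getD "mode" "?")])]

def humanize_event_py_alt (event : String) (level : String) (kv : List (String × String)) : String × String × String :=
  let e := PySem.Str.lower event
  match pvSpec.find? (fun p => p.1 == e) with
  | some (_, icon, tag, pieces) =>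
    let iconS :=
      match icon with
      | .fixed s => s
      | .byDir =>
          let d := pvGetD kv "direction" "?"
          if d == "bullish" then "🔼" else if d == "bearish" then "🔽" else "•"
    (iconS, tag, pvRender pieces kv)
  | none =>
    let top := pvTop kv
    if level == "warning" || level == "warn" || level == "error" then
      let warn := PySem.Str.startswith level "warn"
      ((if warn then "⚠️" else "🛑"), (if warn then "warnings" else "errors"),
       event ++ " · " ++ top)
    else
      ("·", "other", event ++ (if top == "" then "" else " · " ++ top))

-- ===== PRECONDITION & SPEC =====
def Spec_humanize_event_py (event : String) (level : String) (kv : List (String × String)) (out : String × String × String) : Prop := out = humanize_event_py_alt event level kv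
instance (event : String) (level : String) (kv : List (String × String)) (out : String × String × String) : Decidable (Spec_humanize_event_py event level kv out) := by unfold Spec_humanize_event_py; infer_instance

-- ===== CLAIM =====
def Claim_equal_humanize_event_py : Prop := ∀ (event : String) (level : String) (kv : List (String × String)), Dom_humanize_event_py event level kv → Spec_humanize_event_py event level kv (humanize_event_py event level kv)

-- ===== LEMMAS AND PROOFS =====

-- ===== VERDICT =====
theorem humanize_event_py_spec : Claim_equal_humanize_event_py := by
  intro event level kv _
  unfold Spec_humanize_event_py humanize_event_py humanize_event_py_alt pvSpec
  set e := PySem.Str.lower event with he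
  by_cases h1 : e = "fill"
  · simp [h1, List.find?, pvRender, pvEmit, pvEval, String.join, String.append_assoc]
  by_cases h2 : e = "fast_exit"
  · simp [h2, List.find?, pvRender, pvEmit, pvEval, String.join, String.append_assoc]
  by_cases h3 : e = "eod_force_close"
  · simp [h3, List.find?, pvRender, pvEmit, pvEval, String.join]
  by_cases h4 : e = "ensemble_emit"
  · simp [h4, List.find?, pvRender, pvEmit, pvEval, String.join, String.append_assoc]
  by_cases h5 : e = "ensemble_skip"
  · simp [h5, List.find?, pvRender, pvEmit, pvEval, String.join, String.append_assoc]
  by_cases h6 : e = "exec_chain_block"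
  · simp [h6, List.find?, pvRender, pvEmit, pvEval, String.join, String.append_assoc]
  by_cases h7 : e = "exec_chain_pass"
  · simp [h7, List.find?, pvRender, pvEmit, pvEval, String.join, String.append_assoc]
  by_cases h8 : e = "market_state_snapshot"
  · simp [h8, List.find?, pvRender, pvEmit, pvEval, String.join, String.append_assoc]
  by_cases h9 : e = "data_adapter"
  · simp [h9, List.find?, pvRender, pvEmit, pvEval, String.join]
  by_cases h10 : e = "strategy_mode"
  · simp [h10, List.find?, pvRender, pvEmit, pvEval, String.join]
  have b1 : ("fill" == e) = false := beq_eq_false_iff_ne.mpr (Ne.symm h1)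
  have b2 : ("fast_exit" == e) = false := beq_eq_false_iff_ne.mpr (Ne.symm h2)
  have b3 : ("eod_force_close" == e) = false := beq_eq_false_iff_ne.mpr (Ne.symm h3)
  have b4 : ("ensemble_emit" == e) = false := beq_eq_false_iff_ne.mpr (Ne.symm h4)
  have b5 : ("ensemble_skip" == e) = false := beq_eq_false_iff_ne.mpr (Ne.symm h5)
  have b6 : ("exec_chain_block" == e) = false := beq_eq_false_iff_ne.mpr (Ne.symm h6)
  have b7 : ("exec_chain_pass" == e) = false := beq_eq_false_iff_ne.mpr (Ne.symm h7)
  have b8 : ("market_state_snapshot" == e) = false := beq_eq_false_iff_ne.mpr (Ne.symm h8)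
  have b9 : ("data_adapter" == e) = false := beq_eq_false_iff_ne.mpr (Ne.symm h9)
  have b10 : ("strategy_mode" == e) = false := beq_eq_false_iff_ne.mpr (Ne.symm h10)
  simp [h1, h2, h3, h4, h5, h6, h7, h8, h9, h10, b1, b2, b3, b4, b5, b6, b7, b8, b9, b10, List.find?]
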